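-- pv_equiv track=rewrite | github.com/JurajMarcin/WhimSE | whimse/utils/shell.py | _expand_env
-- ===== SOURCE A (Python) =====
-- from collections.abc import Iterable
--
-- def _expand_single(
--     tokens: tuple[str, ...], name: str, values: set[str]
-- ) -> Iterable[tuple[str, ...]]:
--     for value in values:
--         yield tuple(
--             token.replace(f"${{{name}}}", value).replace(f"${name}", value)
--             for token in tokens
--         )
--
-- def _expand_env(
--     tokens: tuple[str, ...], env: dict[str, set[str]]
-- ) -> Iterable[tuple[str, ...]]:
--     old_partially_expanded: list[tuple[str, ...]] = [tokens]
--     for name, values in sorted(env.items(), key=lambda kv: len(kv[0]), reverse=True):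
--         new_partially_expanded: list[tuple[str, ...]] = []
--         for partially_expanded in old_partially_expanded:
--             new_partially_expanded.extend(
--                 _expand_single(partially_expanded, name, values)
--             )
--         old_partially_expanded = new_partially_expanded
--     yield from old_partially_expanded
-- ===== SOURCE B (Python) =====
-- def _product(value_lists):
--     # Cartesian product, first list outermost (varies slowest), by structural recursion.
--     if not value_lists:
--         yield []
--         return
--     head = value_lists[0]
--     rest = value_lists[1:]
--     for value in head:
--         for combo in _product(rest):
--             yield [value] + combo
--
--
-- def _expand_env(tokens, env):
--     items = sorted(env.items(), key=lambda kv: len(kv[0]), reverse=True)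
--     names = [name for name, _ in items]
--     for combo in _product([list(values) for _, values in items]):
--         toks = tuple(tokens)
--         for name, value in zip(names, combo):
--             toks = tuple(
--                 token.replace("${" + name + "}", value).replace("$" + name, value)
--                 for token in toks
--             )
--         yield toks
-- ===== Notes on version B (the rewrite author's own statement) =====
-- stated objective: alternative
-- what changed: Replaces A's level-by-level worklist rebuilding (extend a list of partially-expanded tuples once per variable) with a single Cartesian-product enumeration of value combinations plus a per-combination fold of the substitutions in the same sorted order.
import Mathlib
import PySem

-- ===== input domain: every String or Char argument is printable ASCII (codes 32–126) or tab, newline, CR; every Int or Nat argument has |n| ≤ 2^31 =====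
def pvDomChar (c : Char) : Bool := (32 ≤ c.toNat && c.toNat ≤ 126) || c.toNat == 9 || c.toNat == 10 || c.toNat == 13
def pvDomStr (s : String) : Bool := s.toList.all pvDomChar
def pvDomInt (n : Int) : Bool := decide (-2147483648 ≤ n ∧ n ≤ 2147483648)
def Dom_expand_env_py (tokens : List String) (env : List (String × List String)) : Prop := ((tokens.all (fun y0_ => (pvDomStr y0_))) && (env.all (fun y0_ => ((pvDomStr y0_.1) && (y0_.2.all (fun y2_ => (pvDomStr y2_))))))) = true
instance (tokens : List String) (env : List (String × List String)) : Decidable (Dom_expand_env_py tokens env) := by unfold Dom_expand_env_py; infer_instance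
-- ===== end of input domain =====

-- B replaces A's level-by-level worklist rebuilding with one Cartesian-product enumeration
-- plus a per-combination fold of the substitutions (objective: alternative decomposition).

-- ===== PORT A =====
-- token.replace(f"${{{name}}}", value).replace(f"${name}", value)  (shared by both ports: both Pythons contain this expression verbatim)
def substTok (name value token : String) : String :=
  PySem.Str.replace (PySem.Str.replace token ("${" ++ name ++ "}") value) ("$" ++ name) value

-- _expand_single: one output tuple per value, in iteration order
def expand_single (tokens : List String) (name : String) (values : List String) : List (List String) :=
  values.map (fun value => tokens.map (fun token => substTok name value token))

-- sorted(env.items(), key=lambda kv: len(kv[0]), reverse=True)  (shared: identical call in both Pythons)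
def sortedEnv (env : List (String × List String)) : List (String × List String) :=
  PySem.List.sorted env (fun kv => PySem.Str.len kv.1) true

def expand_env_py (tokens : List String) (env : List (String × List String)) : List (List String) :=
  (sortedEnv env).foldl
    (fun old_partially_expanded kv =>
      old_partially_expanded.flatMap (fun partially_expanded => expand_single partially_expanded kv.1 kv.2))
    [tokens]

-- ===== PORT B =====
-- _product: Cartesian product by structural recursion, first list outermost
def prodCombos : List (List String) → List (List String)
  | [] => [[]]
  | head :: rest => head.flatMap (fun value => (prodCombos rest).map (fun combo => value :: combo))

-- the inner 'for name, value in zip(names, combo): toks = …' loop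
def applyCombo (names : List String) (combo : List String) (tokens : List String) : List String :=
  (names.zip combo).foldl (fun toks nv => toks.map (fun token => substTok nv.1 nv.2 token)) tokens

def expand_env_py_alt (tokens : List String) (env : List (String × List String)) : List (List String) :=
  let items := sortedEnv env
  let names := items.map (fun kv => kv.1)
  (prodCombos (items.map (fun kv => kv.2))).map (fun combo => applyCombo names combo tokens)

-- ===== PRECONDITION & SPEC =====
def Spec_expand_env_py (tokens : List String) (env : List (String × List String)) (out : List (List String)) : Prop := out = expand_env_py_alt tokens env
instance (tokens : List String) (env : List (String × List String)) (out : List (List String)) : Decidable (Spec_expand_env_py tokens env out) := by unfold Spec_expand_env_py; infer_instance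

-- ===== CLAIM (what is proved, stated in full; the proofs are below) =====
def Claim_equal_expand_env_py : Prop := ∀ (tokens : List String) (env : List (String × List String)), Dom_expand_env_py tokens env → Spec_expand_env_py tokens env (expand_env_py tokens env)

-- ===== LEMMAS AND PROOFS =====

-- A's worklist step distributes over the worklist: folding from a list of starts is the
-- flatMap of folding from each start alone.
theorem foldl_flatMap_single (items : List (String × List String)) (l : List (List String)) :
    items.foldl
      (fun old kv => old.flatMap (fun p => expand_single p kv.1 kv.2)) l
    = l.flatMap (fun t =>
        items.foldl (fun old kv => old.flatMap (fun p => expand_single p kv.1 kv.2)) [t]) := by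
  induction items generalizing l with
  | nil => simp
  | cons a items ih =>
    simp only [List.foldl_cons, List.flatMap_singleton]
    rw [ih, List.flatMap_assoc]
    refine List.flatMap_congr ?_
    intro t _
    exact (ih _).symm

-- flatMap over one _expand_single level, rewritten as a flatMap over the values.
theorem flatMap_expand_single (t : List String) (n : String) (vs : List String)
    (g : List String → List (List String)) :
    (expand_single t n vs).flatMap g
    = vs.flatMap (fun v => g (t.map (fun token => substTok n v token))) := by
  simp [expand_single, List.flatMap_map]

-- Main invariant: A's fold from a single start equals B's product-then-substitute.
theorem fold_eq_prod (items : List (String × List String)) (t : List String) :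
    items.foldl
      (fun old kv => old.flatMap (fun p => expand_single p kv.1 kv.2)) [t]
    = (prodCombos (items.map (fun kv => kv.2))).map
        (fun combo => applyCombo (items.map (fun kv => kv.1)) combo t) := by
  induction items generalizing t with
  | nil => simp [prodCombos, applyCombo]
  | cons a items ih =>
    simp only [List.foldl_cons, List.flatMap_singleton]
    rw [foldl_flatMap_single, flatMap_expand_single]
    simp only [prodCombos, List.map_cons, List.map_flatMap, List.map_map]
    refine List.flatMap_congr ?_
    intro v _
    rw [ih]
    refine List.map_congr_left ?_
    intro c _
    simp [applyCombo, Function.comp]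

-- ===== VERDICT (by name: the statement is the Claim_ definition above) =====
theorem expand_env_py_spec : Claim_equal_expand_env_py := by
  intro tokens env _
  show expand_env_py tokens env = expand_env_py_alt tokens env
  simp only [expand_env_py, expand_env_py_alt]
  exact fold_eq_prod (sortedEnv env) tokens
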